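-- pv_equiv track=rewrite | github.com/volianyko/connect-4 | minimax_agent.py | count_inrow_h
-- ===== SOURCE A (Python) =====
-- def valid_coordinate(num_cols, num_rows, x, y):
--     if x<0 or x>=num_rows or y<0 or y>=num_cols:
--         return 0
--     return 1
--
-- def count_inrow_h(board, num_cols, num_rows, inrow, count, player, x, y):
--     c = 0
--     for i in range(y, y+inrow):
--         if not valid_coordinate(num_cols, num_rows, x, i):  return 0
--         if board[x][i] == player:
--             c+=1
--         elif board[x][i] != 0:   return 0
--     return c==count
-- ===== SOURCE B (Python) =====
-- def count_inrow_h(board, num_cols, num_rows, inrow, count, player, x, y):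
--     if inrow <= 0:
--         return 0 == count
--     if x < 0 or x >= num_rows or y < 0 or y + inrow > num_cols:
--         return 0
--     window = board[x][y:y + inrow]
--     if any(v != 0 and v != player for v in window):
--         return 0
--     return window.count(player) == count
-- ===== Notes on version B (the rewrite author's own statement) =====
-- stated objective: simpler
-- what changed: A interleaves a per-cell validity check with the counting loop and early returns; B first decides the whole-window bounds in one closed-form test, then takes the window as a slice and answers with any() for blockers plus window.count(player), removing the per-cell valid_coordinate calls and the manual counter.
-- outside the precondition, e.g. on count_inrow_h([[5]], 2, 1, 2, 0, 1, 0, 0): A returns 0, B returns 0; on count_inrow_h([[0, 1]], 2, 1, 1, 1, 1, 0, 5): A returns 0, B returns 0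
import Mathlib
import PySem

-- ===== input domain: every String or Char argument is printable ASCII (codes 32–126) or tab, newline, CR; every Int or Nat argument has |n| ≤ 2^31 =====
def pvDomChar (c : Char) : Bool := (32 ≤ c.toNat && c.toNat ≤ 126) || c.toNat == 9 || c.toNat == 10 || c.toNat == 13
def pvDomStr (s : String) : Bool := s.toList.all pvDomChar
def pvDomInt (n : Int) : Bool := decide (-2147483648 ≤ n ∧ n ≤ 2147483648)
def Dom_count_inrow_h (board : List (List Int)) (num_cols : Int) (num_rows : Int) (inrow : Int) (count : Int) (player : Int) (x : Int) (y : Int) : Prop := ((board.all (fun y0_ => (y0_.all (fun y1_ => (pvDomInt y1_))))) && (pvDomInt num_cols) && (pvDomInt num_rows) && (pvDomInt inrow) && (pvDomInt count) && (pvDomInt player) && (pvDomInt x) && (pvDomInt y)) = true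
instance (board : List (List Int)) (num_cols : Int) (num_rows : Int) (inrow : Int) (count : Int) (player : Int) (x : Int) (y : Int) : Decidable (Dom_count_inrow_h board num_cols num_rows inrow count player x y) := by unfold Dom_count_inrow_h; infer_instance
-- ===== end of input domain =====

-- B replaces A's interleaved per-cell validity+count loop by one closed-form
-- whole-window bounds test followed by a slice scanned with any/count (simpler decomposition).


-- ===== PORT A =====
def valid_coordinate (num_cols : Int) (num_rows : Int) (x : Int) (y : Int) : Int :=
  if x < 0 || num_rows ≤ x || y < 0 || num_cols ≤ y then 0 else 1

-- A's for-loop over range(y, y+inrow) with counter c and early returns.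
-- board[x][i] is ported with pyGetD; Pre_count_inrow_h keeps every performed access in range.
def pvALoop (board : List (List Int)) (num_cols : Int) (num_rows : Int) (count : Int) (player : Int) (x : Int) : List Int → Int → Bool
  | [], c => c == count
  | i :: rest, c =>
    if valid_coordinate num_cols num_rows x i == 0 then false
    else
      if PySem.List.pyGetD (PySem.List.pyGetD board x []) i 0 == player then
        pvALoop board num_cols num_rows count player x rest (c + 1)
      else if !(PySem.List.pyGetD (PySem.List.pyGetD board x []) i 0 == 0) then false
      else pvALoop board num_cols num_rows count player x rest c

def count_inrow_h (board : List (List Int)) (num_cols : Int) (num_rows : Int) (inrow : Int) (count : Int) (player : Int) (x : Int) (y : Int) : Bool :=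
  pvALoop board num_cols num_rows count player x (PySem.List.pyRange y (y + inrow) 1) 0

-- ===== PORT B =====
def count_inrow_h_alt (board : List (List Int)) (num_cols : Int) (num_rows : Int) (inrow : Int) (count : Int) (player : Int) (x : Int) (y : Int) : Bool :=
  if inrow ≤ 0 then (0 : Int) == count
  else if x < 0 || num_rows ≤ x || y < 0 || num_cols < y + inrow then false
  else
    let window := PySem.List.slice (PySem.List.pyGetD board x []) (some y) (some (y + inrow))
    if window.any (fun v => !(v == 0) && !(v == player)) then false
    else ((window.count player : Int) == count)

-- ===== PRECONDITION & SPEC =====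
-- Pre_ holds exactly where A returns a value of the declared Bool return type (its final
-- 'return c==count'). It excludes (a) the inputs on which A raises IndexError (board[x][i]
-- accessed past the end of board or of row x), and (b) the inputs on which A early-returns
-- the bare Python int 0 (an invalid window coordinate or a blocking piece) — an int, not a
-- bool, which the Bool-typed port cannot represent; Python B returns the same falsy 0 there
-- (0 == False in Python), so nothing behavioural is being hidden, only the type mismatch.
def Pre_count_inrow_h (board : List (List Int)) (num_cols : Int) (num_rows : Int) (inrow : Int) (count : Int) (player : Int) (x : Int) (y : Int) : Prop :=
  inrow ≤ 0 ∨
    (0 ≤ x ∧ x < num_rows ∧ 0 ≤ y ∧ y + inrow ≤ num_cols ∧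
      x < (board.length : Int) ∧
      y + inrow ≤ ((PySem.List.pyGetD board x []).length : Int) ∧
      (PySem.List.slice (PySem.List.pyGetD board x []) (some y) (some (y + inrow))).all
        (fun v => v == 0 || v == player) = true)
instance (board : List (List Int)) (num_cols : Int) (num_rows : Int) (inrow : Int) (count : Int) (player : Int) (x : Int) (y : Int) : Decidable (Pre_count_inrow_h board num_cols num_rows inrow count player x y) := by unfold Pre_count_inrow_h; infer_instance

def pvWitness_count_inrow_h : List (List Int) × Int × Int × Int × Int × Int × Int × Int :=
  ([[0]], 1, 1, 1, 0, 1, 0, 0)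

def Spec_count_inrow_h (board : List (List Int)) (num_cols : Int) (num_rows : Int) (inrow : Int) (count : Int) (player : Int) (x : Int) (y : Int) (out : Bool) : Prop := out = count_inrow_h_alt board num_cols num_rows inrow count player x y
instance (board : List (List Int)) (num_cols : Int) (num_rows : Int) (inrow : Int) (count : Int) (player : Int) (x : Int) (y : Int) (out : Bool) : Decidable (Spec_count_inrow_h board num_cols num_rows inrow count player x y out) := by unfold Spec_count_inrow_h; infer_instance

-- ===== CLAIM (what is proved, stated in full; the proofs are below) =====
def Claim_equal_count_inrow_h : Prop := ∀ (board : List (List Int)) (num_cols : Int) (num_rows : Int) (inrow : Int) (count : Int) (player : Int) (x : Int) (y : Int), Dom_count_inrow_h board num_cols num_rows inrow count player x y → Pre_count_inrow_h board num_cols num_rows inrow count player x y → Spec_count_inrow_h board num_cols num_rows inrow count player x y (count_inrow_h board num_cols num_rows inrow count player x y)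

-- ===== LEMMAS AND PROOFS =====

-- value-level reading of A's loop (validity checks dropped: they hold on the list fed in)
def pvVLoop (count : Int) (player : Int) : List Int → Int → Bool
  | [], c => c == count
  | v :: vs, c =>
    if v == player then pvVLoop count player vs (c + 1)
    else if !(v == 0) then false
    else pvVLoop count player vs c

theorem pvALoop_eq_pvVLoop (board : List (List Int)) (num_cols num_rows count player x : Int) :
    ∀ (l : List Int) (c : Int), (∀ i ∈ l, ¬ valid_coordinate num_cols num_rows x i = 0) →
      pvALoop board num_cols num_rows count player x l c
        = pvVLoop count player (l.map (fun i => PySem.List.pyGetD (PySem.List.pyGetD board x []) i 0)) c := by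
  intro l
  induction l with
  | nil => intro c _; simp [pvALoop, pvVLoop]
  | cons i rest ih =>
    intro c h
    have hi : ¬ valid_coordinate num_cols num_rows x i = 0 := h i (by simp)
    have hrest : ∀ j ∈ rest, ¬ valid_coordinate num_cols num_rows x j = 0 :=
      fun j hj => h j (by simp [hj])
    simp only [pvALoop, pvVLoop, List.map_cons, beq_iff_eq, hi, if_false]
    split
    · exact ih _ hrest
    · split
      · rfl
      · exact ih _ hrest

theorem pvVLoop_closed (count player : Int) :
    ∀ (vs : List Int) (c : Int),
      pvVLoop count player vs c
        = if vs.any (fun v => !(v == 0) && !(v == player)) then false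
          else ((c + (vs.count player : Int)) == count) := by
  intro vs
  induction vs with
  | nil => intro c; simp [pvVLoop]
  | cons v vs ih =>
    intro c
    by_cases hp : v = player
    · simp only [pvVLoop, hp, beq_self_eq_true, if_true, List.any_cons, Bool.not_true,
        Bool.and_false, Bool.false_or, List.count_cons_self, ih]
      split
      · rfl
      · congr 1
        push_cast
        ring
    · by_cases h0 : v = 0
      · subst h0
        have h1 : ((0 : Int) == player) = false := by simpa using hp
        simp [pvVLoop, ih, List.count_cons, h1]
      · simp [pvVLoop, hp, h0]

theorem map_pyGetD_pyRange_eq_slice (row : List Int) (y n : Int)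
    (hy : 0 ≤ y) (hn : 0 < n) (hlen : y + n ≤ (row.length : Int)) :
    (PySem.List.pyRange y (y + n) 1).map (fun i => PySem.List.pyGetD row i 0)
      = PySem.List.slice row (some y) (some (y + n)) := by
  rw [PySem.List.slice_toNat row hy (by omega), PySem.List.pyRange_one]
  apply List.ext_getElem
  · simp; omega
  · intro k hk1 hk2
    simp only [List.getElem_map, List.getElem_range]
    have hkn : (k : Int) < n := by simp at hk1; omega
    have hik1 : 0 ≤ y + (k : Int) := by omega
    have hik2 : y + (k : Int) < (row.length : Int) := by omega
    rw [PySem.List.pyGetD_eq_getElem row 0 hik1 hik2]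
    rw [List.getElem_take, List.getElem_drop]
    congr 1
    omega

-- ===== VERDICT (by name: the statement is the Claim_ definition above) =====
theorem count_inrow_h_spec : Claim_equal_count_inrow_h := by
  unfold Claim_equal_count_inrow_h
  intro board num_cols num_rows inrow count player x y _hdom hpre
  unfold Spec_count_inrow_h count_inrow_h count_inrow_h_alt
  by_cases h0 : inrow ≤ 0
  · have hr : PySem.List.pyRange y (y + inrow) 1 = [] :=
      PySem.List.pyRange_one_eq_nil (by omega)
    simp [pvALoop, h0, hr]
  · push_neg at h0
    simp only [if_neg (by omega : ¬ inrow ≤ 0)]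
    have hp : 0 ≤ x ∧ x < num_rows ∧ 0 ≤ y ∧ y + inrow ≤ num_cols ∧
        x < (board.length : Int) ∧
        y + inrow ≤ ((PySem.List.pyGetD board x []).length : Int) ∧
        (PySem.List.slice (PySem.List.pyGetD board x []) (some y) (some (y + inrow))).all
          (fun v => v == 0 || v == player) = true := by
      rcases hpre with h | h
      · omega
      · exact h
    obtain ⟨hx0, hxr, hy0, hyc, hbl, hlen, hclean⟩ := hp
    have hguard : (x < 0 || num_rows ≤ x || y < 0 || num_cols < y + inrow) = false := by
      simp only [Bool.or_eq_false_iff, decide_eq_false_iff_not]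
      exact ⟨⟨⟨by omega, by omega⟩, by omega⟩, by omega⟩
    have hallvalid : ∀ i ∈ PySem.List.pyRange y (y + inrow) 1,
        ¬ valid_coordinate num_cols num_rows x i = 0 := by
      intro i hi
      rw [PySem.List.mem_pyRange_one] at hi
      unfold valid_coordinate
      have h1 : (x < 0 || num_rows ≤ x || i < 0 || num_cols ≤ i) = false := by
        simp only [Bool.or_eq_false_iff, decide_eq_false_iff_not]
        exact ⟨⟨⟨by omega, by omega⟩, by omega⟩, by omega⟩
      simp [h1]
    have hany : (PySem.List.slice (PySem.List.pyGetD board x []) (some y) (some (y + inrow))).any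
        (fun v => !(v == 0) && !(v == player)) = false := by
      rw [List.any_eq_false]
      intro v hv
      have := (List.all_eq_true.mp hclean) v hv
      simp only [Bool.or_eq_true] at this
      simp only [Bool.and_eq_true, Bool.not_eq_eq_eq_not, Bool.not_true]
      rcases this with h | h
      · intro hc; exact absurd h (by simp [hc.1])
      · intro hc; exact absurd h (by simp [hc.2])
    rw [pvALoop_eq_pvVLoop board num_cols num_rows count player x _ 0 hallvalid]
    rw [map_pyGetD_pyRange_eq_slice _ y inrow hy0 h0 hlen]
    rw [pvVLoop_closed]
    simp [hguard, hany]
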